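-- pv_equiv track=rewrite | github.com/matzayonc/agh | asd/kol1a/kol1a.py | rotate_if_needed
-- ===== SOURCE A (Python) =====
-- def rotate_if_needed(s):
--     i = 0
--     while i < len(s) and s[i] == s[len(s)-1-i]:
--         i += 1
--
--     if i == len(s):
--         return s
--
--     if s[i] > s[len(s)-1-i]:
--         return s[::-1]
--     else:
--         return s
-- ===== SOURCE B (Python) =====
-- def rotate_if_needed(s):
--     r = s[::-1]
--     return r if r < s else s
-- ===== Notes on version B (the rewrite author's own statement) =====
-- stated objective: simpler
-- what changed: Replaces the manual index loop over mirrored positions with a closed-form whole-string comparison: return the reverse exactly when it is lexicographically smaller than s (ties keep s).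
import Mathlib
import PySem

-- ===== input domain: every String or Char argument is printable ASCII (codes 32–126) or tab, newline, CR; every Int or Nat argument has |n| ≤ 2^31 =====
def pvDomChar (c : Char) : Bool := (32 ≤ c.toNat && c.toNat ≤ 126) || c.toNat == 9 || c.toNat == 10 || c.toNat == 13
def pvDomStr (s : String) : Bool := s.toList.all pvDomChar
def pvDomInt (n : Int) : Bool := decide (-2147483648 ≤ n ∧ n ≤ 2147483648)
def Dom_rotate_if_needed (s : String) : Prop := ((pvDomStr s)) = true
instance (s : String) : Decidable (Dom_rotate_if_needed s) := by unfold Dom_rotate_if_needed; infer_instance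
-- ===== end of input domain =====

-- B replaces A's manual index loop over mirrored positions with a whole-string
-- lexicographic comparison against the reverse (objective: simpler).

-- ===== PORT A =====
-- A's while loop: advance i while i < len(s) and s[i] == s[len(s)-1-i].
-- Both indices are in range whenever the guard reads them, so getD is exact here.
def rotateALoop (t : List Char) (i : Nat) : Nat :=
  if h : i < t.length ∧ t.getD i ' ' = t.getD (t.length - 1 - i) ' ' then
    rotateALoop t (i + 1)
  else i
termination_by t.length - i
decreasing_by omega

def rotate_if_needed (s : String) : String :=
  let t := s.toList
  let i := rotateALoop t 0
  if i = t.length then s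
  else if t.getD (t.length - 1 - i) ' ' < t.getD i ' ' then  -- s[i] > s[len-1-i]
    String.ofList t.reverse                                      -- s[::-1]
  else s

-- ===== PORT B =====
-- Python's '<' on strings: lexicographic comparison by code point (hand port, exact on all strings).
def pyStrLtChars : List Char → List Char → Bool
  | [], [] => false
  | [], _ :: _ => true
  | _ :: _, [] => false
  | a :: as, b :: bs => if a < b then true else if b < a then false else pyStrLtChars as bs

def rotate_if_needed_alt (s : String) : String :=
  let r := String.ofList s.toList.reverse   -- s[::-1]
  if pyStrLtChars r.toList s.toList then r else s

-- ===== PRECONDITION & SPEC =====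
def Spec_rotate_if_needed (s : String) (out : String) : Prop := out = rotate_if_needed_alt s
instance (s : String) (out : String) : Decidable (Spec_rotate_if_needed s out) := by unfold Spec_rotate_if_needed; infer_instance

-- ===== CLAIM (what is proved, stated in full; the proofs are below) =====
def Claim_equal_rotate_if_needed : Prop := ∀ (s : String), Dom_rotate_if_needed s → Spec_rotate_if_needed s (rotate_if_needed s)

-- ===== LEMMAS AND PROOFS =====

-- first differing pair of two character lists (proof-side helper)
def firstDiff : List Char → List Char → Option (Char × Char)
  | a :: as, b :: bs => if a = b then firstDiff as bs else some (a, b)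
  | _, _ => none

theorem pyStrLtChars_eq_firstDiff (a b : List Char) (h : a.length = b.length) :
    pyStrLtChars a b = (match firstDiff a b with
      | some (x, y) => decide (x < y)
      | none => false) := by
  induction a generalizing b with
  | nil =>
    cases b with
    | nil => simp [pyStrLtChars, firstDiff]
    | cons y ys => simp at h
  | cons x xs ih =>
    cases b with
    | nil => simp at h
    | cons y ys =>
      simp only [List.length_cons, Nat.add_right_cancel_iff] at h
      by_cases hxy : x = y
      · subst hxy
        simp [pyStrLtChars, firstDiff, ih ys h]
      · rcases lt_trichotomy x y with hlt | heq | hgt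
        · simp [pyStrLtChars, firstDiff, hxy, hlt]
        · exact absurd heq hxy
        · simp [pyStrLtChars, firstDiff, hxy, hgt, not_lt_of_gt hgt]

theorem rotateALoop_bounds (t : List Char) (i : Nat) (h : i ≤ t.length) :
    i ≤ rotateALoop t i ∧ rotateALoop t i ≤ t.length := by
  rw [rotateALoop]
  split
  · next hc =>
    have := rotateALoop_bounds t (i + 1) (by omega)
    omega
  · exact ⟨le_refl _, h⟩
termination_by t.length - i
decreasing_by omega

theorem firstDiff_drop (t : List Char) (i : Nat) (h : i ≤ t.length) :
    firstDiff (t.reverse.drop i) (t.drop i) =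
      (if rotateALoop t i = t.length then none
       else some (t.getD (t.length - 1 - rotateALoop t i) ' ', t.getD (rotateALoop t i) ' ')) := by
  rw [rotateALoop]
  split
  · next hc =>
    obtain ⟨hi, heq⟩ := hc
    have hri : i < t.reverse.length := by simpa using hi
    have hmi : t.length - 1 - i < t.length := by omega
    rw [List.drop_eq_getElem_cons hri, List.drop_eq_getElem_cons hi]
    have hrev : t.reverse[i]'hri = t[t.length - 1 - i]'hmi := List.getElem_reverse _
    rw [List.getD_eq_getElem t ' ' hi, List.getD_eq_getElem t ' ' hmi] at heq
    have hstep := firstDiff_drop t (i + 1) (by omega)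
    simpa [firstDiff, hrev, heq] using hstep
  · next hc =>
    push Not at hc
    by_cases hn : i = t.length
    · subst hn
      simp [firstDiff]
    · have hi : i < t.length := by omega
      have hne := hc hi
      have hri : i < t.reverse.length := by simpa using hi
      have hmi : t.length - 1 - i < t.length := by omega
      rw [List.drop_eq_getElem_cons hri, List.drop_eq_getElem_cons hi]
      have hrev : t.reverse[i]'hri = t[t.length - 1 - i]'hmi := List.getElem_reverse _
      rw [List.getD_eq_getElem t ' ' hi, List.getD_eq_getElem t ' ' hmi] at hne
      simp [firstDiff, hrev, hn, Ne.symm hne, List.getElem?_eq_getElem hi,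
        List.getElem?_eq_getElem hmi]
termination_by t.length - i
decreasing_by omega

-- ===== VERDICT (by name: the statement is the Claim_ definition above) =====
theorem rotate_if_needed_spec : Claim_equal_rotate_if_needed := by
  intro s _
  unfold Spec_rotate_if_needed rotate_if_needed rotate_if_needed_alt
  set t := s.toList with ht
  have hmk : (String.ofList t.reverse).toList = t.reverse := by simp
  have hlen : t.reverse.length = t.length := by simp
  have hfd := firstDiff_drop t 0 (Nat.zero_le _)
  simp only [List.drop_zero] at hfd
  have hlt := pyStrLtChars_eq_firstDiff t.reverse t hlen
  rw [hfd] at hlt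
  have hb := rotateALoop_bounds t 0 (Nat.zero_le _)
  by_cases hj : rotateALoop t 0 = t.length
  · simp [hj] at hlt
    simp [hj, hmk, hlt]
  · simp [hj] at hlt
    simp [hj, hmk, hlt]
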